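-- pv_equiv track=rewrite | github.com/raulminan/rosalind_solutions | exercises/BA_ch3/BA3C.py | overlap_graph
-- ===== SOURCE A (Python) =====
-- def overlap_graph(patterns: list):
--     """Constructs the overlap graph of a collection of k-mers
--
--     Parameters
--     ----------
--     patterns : list
--         list of kmers
--     """
--     graph = []
--     patterns = sorted(patterns)
--     for i in range(len(patterns)):
--         pattern = patterns[i]
--         new_patterns = patterns[:i] + patterns[i+1:] # remove current kmer
--         for j in range(len(new_patterns)):
--             pattern2 = new_patterns[j]
--             if pattern[1:] == pattern2[:-1]:
--                 graph.append(f"{pattern} -> {pattern2}")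
--     return graph
-- ===== SOURCE B (Python) =====
-- def overlap_graph(patterns: list):
--     """Constructs the overlap graph of a collection of k-mers.
--
--     Indexes the sorted k-mers by their (k-1)-prefix once, then looks each
--     k-mer's suffix up in that index instead of scanning all other k-mers.
--     """
--     ps = sorted(patterns)
--     index = {}
--     for p in ps:
--         index.setdefault(p[:-1], []).append(p)
--     graph = []
--     for p in ps:
--         skip = p[1:] == p[:-1]  # the current kmer sits in its own bucket; drop one copy
--         for q in index.get(p[1:], []):
--             if skip and q == p:
--                 skip = False
--             else:
--                 graph.append(f"{p} -> {q}")
--     return graph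
-- ===== Notes on version B (the rewrite author's own statement) =====
-- stated objective: faster
-- what changed: Replaces the quadratic all-pairs scan (rebuilding and rescanning the patterns-minus-current list for every k-mer) with a dict that buckets the sorted k-mers by their (k-1)-prefix once, so each k-mer's edges come from one hash lookup of its suffix, skipping one copy of itself.
import Mathlib
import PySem

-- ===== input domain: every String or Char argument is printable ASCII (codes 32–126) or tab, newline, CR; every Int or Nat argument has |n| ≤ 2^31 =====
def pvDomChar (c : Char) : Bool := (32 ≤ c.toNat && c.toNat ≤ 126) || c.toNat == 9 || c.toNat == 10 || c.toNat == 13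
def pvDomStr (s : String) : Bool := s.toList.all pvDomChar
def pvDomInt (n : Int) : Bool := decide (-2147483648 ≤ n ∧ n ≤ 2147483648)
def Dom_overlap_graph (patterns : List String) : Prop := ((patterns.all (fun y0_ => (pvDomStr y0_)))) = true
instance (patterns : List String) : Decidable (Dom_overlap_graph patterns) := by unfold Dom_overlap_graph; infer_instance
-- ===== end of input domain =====

-- B replaces A's quadratic all-pairs scan by a dict bucketing the sorted k-mers by
-- (k-1)-prefix, looked up once per k-mer (objective: faster).

-- ===== PORT A =====
def overlap_graph (patterns : List String) : List String :=
  let ps := PySem.List.sorted patterns (fun x => x)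
  (PySem.List.pyRange 0 (ps.length : Int)).foldl (fun graph i =>
    let pattern := PySem.List.pyGetD ps i ""
    let new_patterns := PySem.List.slice ps none (some i) ++ PySem.List.slice ps (some (i + 1)) none
    (PySem.List.pyRange 0 (new_patterns.length : Int)).foldl (fun g j =>
      let pattern2 := PySem.List.pyGetD new_patterns j ""
      if PySem.Str.slice pattern (some 1) none == PySem.Str.slice pattern2 none (some (-1)) then
        g ++ [pattern ++ " -> " ++ pattern2]
      else g) graph) []

-- ===== PORT B =====
def overlap_graph_alt (patterns : List String) : List String :=
  let ps := PySem.List.sorted patterns (fun x => x)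
  let index := ps.foldl (fun d p =>
    d.modify (PySem.Str.slice p none (some (-1))) [] (fun b => b ++ [p])) PySem.Dict.empty
  ps.foldl (fun graph p =>
    ((PySem.Dict.getD index (PySem.Str.slice p (some 1) none) []).foldl
        (fun (acc : List String × Bool) q =>
          if acc.2 && (q == p) then (acc.1, false)
          else (acc.1 ++ [p ++ " -> " ++ q], acc.2))
        (graph, PySem.Str.slice p (some 1) none == PySem.Str.slice p none (some (-1)))).1) []

-- ===== PRECONDITION & SPEC =====
def Spec_overlap_graph (patterns : List String) (out : List String) : Prop := out = overlap_graph_alt patterns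
instance (patterns : List String) (out : List String) : Decidable (Spec_overlap_graph patterns out) := by unfold Spec_overlap_graph; infer_instance

-- ===== CLAIM (what is proved, stated in full; the proofs are below) =====
def Claim_equal_overlap_graph : Prop := ∀ (patterns : List String), Dom_overlap_graph patterns → Spec_overlap_graph patterns (overlap_graph patterns)

-- ===== LEMMAS AND PROOFS =====

def pvSuf (p : String) : String := PySem.Str.slice p (some 1) none
def pvPre (q : String) : String := PySem.Str.slice q none (some (-1))
def pvEdge (p q : String) : String := p ++ " -> " ++ q

-- B's per-pattern edge list, in normal form
def pvEB (s : List String) (p : String) : List String :=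
  if pvSuf p == pvPre p then
    ((s.filter (fun q => pvSuf p == pvPre q)).erase p).map (pvEdge p)
  else (s.filter (fun q => pvSuf p == pvPre q)).map (pvEdge p)

-- A's per-index edge list, in normal form
def pvEA (s : List String) (i : Nat) : List String :=
  ((s.take i ++ s.drop (i + 1)).filter
      (fun q => pvSuf (s.getD i "") == pvPre q)).map (pvEdge (s.getD i ""))

theorem pvBeqComm (a b : String) : (a == b) = (b == a) := by
  by_cases h : a = b
  · simp [h]
  · simp [h, Ne.symm h]

theorem pvA_normal (patterns : List String) :
    overlap_graph patterns =
      (List.range (PySem.List.sorted patterns (fun x => x)).length).flatMap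
        (pvEA (PySem.List.sorted patterns (fun x => x))) := by
  unfold overlap_graph
  set s := PySem.List.sorted patterns (fun x => x) with hs
  dsimp only
  rw [PySem.List.pyRange_zero_natCast, List.foldl_map]
  have hfun : (fun (graph : List String) (k : Nat) =>
      (PySem.List.pyRange 0 ((PySem.List.slice s none (some (k : Int)) ++
          PySem.List.slice s (some ((k : Int) + 1)) none).length : Int)).foldl (fun g j =>
        if PySem.Str.slice (PySem.List.pyGetD s (k : Int) "") (some 1) none ==
            PySem.Str.slice (PySem.List.pyGetD
              (PySem.List.slice s none (some (k : Int)) ++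
                PySem.List.slice s (some ((k : Int) + 1)) none) j "") none (some (-1)) then
          g ++ [PySem.List.pyGetD s (k : Int) "" ++ " -> " ++
            PySem.List.pyGetD (PySem.List.slice s none (some (k : Int)) ++
              PySem.List.slice s (some ((k : Int) + 1)) none) j ""]
        else g) graph) =
      (fun (graph : List String) (k : Nat) => graph ++ pvEA s k) := by
    funext graph k
    have hk1 : ((k : Int) + 1) = ((k + 1 : Nat) : Int) := by push_cast; ring
    rw [hk1, PySem.List.slice_to_natCast, PySem.List.slice_from_natCast]
    rw [PySem.List.foldl_pyRange_zero_pyGetD' (s.take k ++ s.drop (k + 1)) ""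
      (fun g q =>
        if PySem.Str.slice (PySem.List.pyGetD s (k : Int) "") (some 1) none ==
            PySem.Str.slice q none (some (-1)) then
          g ++ [PySem.List.pyGetD s (k : Int) "" ++ " -> " ++ q]
        else g) graph]
    rw [PySem.List.foldl_append_if
      (fun q => PySem.Str.slice (PySem.List.pyGetD s (k : Int) "") (some 1) none ==
        PySem.Str.slice q none (some (-1)))
      (fun q => PySem.List.pyGetD s (k : Int) "" ++ " -> " ++ q)]
    simp only [PySem.List.pyGetD_natCast]
    rfl
  rw [hfun, PySem.List.foldl_append_eq_flatMap, List.nil_append]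

theorem pvDict_build (l : List String) (d : PySem.Dict String (List String)) (k : String) :
    PySem.Dict.getD
        (l.foldl (fun d p => d.modify (pvPre p) [] (fun b => b ++ [p])) d) k [] =
      PySem.Dict.getD d k [] ++ l.filter (fun q => pvPre q == k) := by
  induction l generalizing d with
  | nil => simp
  | cons p l ih =>
    simp only [List.foldl_cons, List.filter_cons]
    rw [ih]
    by_cases h : pvPre p = k
    · subst h
      simp [PySem.Dict.modify]
    · simp [PySem.Dict.modify, PySem.Dict.getD_insert, h, Ne.symm h]

theorem pvSkip_false (p : String) (l : List String) (g : List String) :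
    l.foldl (fun (acc : List String × Bool) q =>
        if acc.2 && (q == p) then (acc.1, false)
        else (acc.1 ++ [p ++ " -> " ++ q], acc.2)) (g, false) =
      (g ++ l.map (pvEdge p), false) := by
  induction l generalizing g with
  | nil => simp
  | cons q l ih =>
    simp only [List.foldl_cons, Bool.false_and, if_neg (by simp : ¬ (false = true))]
    rw [ih]
    simp [pvEdge]

theorem pvSkip_true (p : String) (l : List String) (g : List String) (hp : p ∈ l) :
    l.foldl (fun (acc : List String × Bool) q =>
        if acc.2 && (q == p) then (acc.1, false)
        else (acc.1 ++ [p ++ " -> " ++ q], acc.2)) (g, true) =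
      (g ++ (l.erase p).map (pvEdge p), false) := by
  induction l generalizing g with
  | nil => cases hp
  | cons q l ih =>
    by_cases hq : q = p
    · subst hq
      simp only [List.foldl_cons]
      rw [if_pos (by simp), pvSkip_false, List.erase_cons_head]
    · have hp' : p ∈ l := by
        cases hp with
        | head => exact absurd rfl hq
        | tail _ h => exact h
      simp only [List.foldl_cons]
      rw [if_neg (by simp [hq]), ih _ hp', List.erase_cons_tail (by simp [hq])]
      simp [pvEdge]

theorem pvB_normal (patterns : List String) :
    overlap_graph_alt patterns =
      (PySem.List.sorted patterns (fun x => x)).flatMap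
        (pvEB (PySem.List.sorted patterns (fun x => x))) := by
  unfold overlap_graph_alt
  set s := PySem.List.sorted patterns (fun x => x) with hs
  dsimp only
  have hidx : ∀ k : String,
      PySem.Dict.getD
        (s.foldl (fun d p => d.modify (PySem.Str.slice p none (some (-1))) []
          (fun b => b ++ [p])) PySem.Dict.empty) k [] =
      s.filter (fun q => pvPre q == k) := by
    intro k
    have := pvDict_build s PySem.Dict.empty k
    simp only [pvPre] at this ⊢
    rw [this]
    simp [PySem.Dict.getD, PySem.Dict.get?_empty]
  have hcong : s.foldl (fun graph p =>
      ((PySem.Dict.getD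
          (s.foldl (fun d p => d.modify (PySem.Str.slice p none (some (-1))) []
            (fun b => b ++ [p])) PySem.Dict.empty)
          (PySem.Str.slice p (some 1) none) []).foldl
        (fun (acc : List String × Bool) q =>
          if acc.2 && (q == p) then (acc.1, false)
          else (acc.1 ++ [p ++ " -> " ++ q], acc.2))
        (graph, PySem.Str.slice p (some 1) none == PySem.Str.slice p none (some (-1)))).1) [] =
      s.foldl (fun graph p => graph ++ pvEB s p) [] := by
    apply PySem.List.foldl_congr_mem
    intro graph p hp
    rw [hidx (PySem.Str.slice p (some 1) none)]
    have hfilter : (s.filter (fun q => pvPre q == PySem.Str.slice p (some 1) none)) =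
        s.filter (fun q => pvSuf p == pvPre q) := by
      apply List.filter_congr
      intro q _
      rw [pvBeqComm]
      rfl
    rw [hfilter]
    by_cases hflag : pvSuf p == pvPre p
    · have hpe : p ∈ s.filter (fun q => pvSuf p == pvPre q) :=
        List.mem_filter.2 ⟨hp, hflag⟩
      rw [show PySem.Str.slice p (some 1) none = pvSuf p from rfl,
        show PySem.Str.slice p none (some (-1)) = pvPre p from rfl,
        hflag, pvSkip_true p _ graph hpe]
      simp [pvEB, hflag]
    · rw [show PySem.Str.slice p (some 1) none = pvSuf p from rfl,
        show PySem.Str.slice p none (some (-1)) = pvPre p from rfl,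
        Bool.eq_false_iff.2 hflag, pvSkip_false]
      simp [pvEB, hflag]
  rw [hcong, PySem.List.foldl_append_eq_flatMap, List.nil_append]

theorem pvConst_append (p : String) (u v : List String) (h : ∀ y ∈ u, y = p) :
    u ++ p :: v = p :: (u ++ v) := by
  induction u with
  | nil => rfl
  | cons x u ih =>
    have hx := h x (by simp)
    subst hx
    simp only [List.cons_append]
    rw [ih (fun y hy => h y (by simp [hy]))]

theorem pvErase_append_cons (p : String) (u v : List String)
    (hu : ∀ x ∈ u, x ≤ p) (hs : u.Pairwise (· ≤ ·)) :
    (u ++ p :: v).erase p = u ++ v := by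
  induction u with
  | nil => simp
  | cons x u ih =>
    by_cases hx : x = p
    · subst hx
      simp only [List.cons_append, List.erase_cons_head]
      have hall : ∀ y ∈ u, y = x := fun y hy =>
        le_antisymm (hu y (by simp [hy])) (List.rel_of_pairwise_cons hs hy)
      rw [pvConst_append x u v hall]
    · simp only [List.cons_append]
      rw [List.erase_cons_tail (by simp [hx]),
        ih (fun y hy => hu y (by simp [hy])) (List.Pairwise.of_cons hs)]

theorem pvFlat_range (s : List String) (G : String → List String) :
    (List.range s.length).flatMap (fun i => G (s.getD i "")) = s.flatMap G := by
  induction s with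
  | nil => simp
  | cons a t ih =>
    rw [List.length_cons, List.range_succ_eq_map]
    simp only [List.flatMap_cons, List.flatMap_map, List.getD_cons_zero,
      List.getD_cons_succ]
    rw [ih]

theorem pvFlatMap_congr {α β : Type} (l : List α) (f g : α → List β)
    (h : ∀ a ∈ l, f a = g a) : l.flatMap f = l.flatMap g := by
  induction l with
  | nil => rfl
  | cons a t ih =>
    simp only [List.flatMap_cons]
    rw [h a (by simp), ih (fun a ha => h a (by simp [ha]))]

theorem pvPer_index (s : List String) (hs : s.Pairwise (· ≤ ·)) (i : Nat)
    (hi : i < s.length) : pvEA s i = pvEB s (s.getD i "") := by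
  have hget : s.getD i "" = s[i] := List.getD_eq_getElem s "" hi
  have hdecomp : s.take i ++ s[i] :: s.drop (i + 1) = s := by
    rw [← List.drop_eq_getElem_cons hi, List.take_append_drop]
  set p := s[i] with hp
  unfold pvEA pvEB
  rw [hget]
  set f : String → Bool := fun q => pvSuf p == pvPre q with hf
  by_cases hflag : pvSuf p == pvPre p
  · rw [if_pos hflag]
    have hfp : f p = true := hflag
    conv_rhs => rw [← hdecomp]
    rw [List.filter_append, List.filter_append, List.filter_cons, if_pos hfp]
    have hsd : ((s.take i).filter f ++ p :: (s.drop (i + 1)).filter f).erase p =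
        (s.take i).filter f ++ (s.drop (i + 1)).filter f := by
      apply pvErase_append_cons
      · intro x hx
        have hx' : x ∈ s.take i := (List.mem_filter.1 hx).1
        have hs' : (s.take i ++ p :: s.drop (i + 1)).Pairwise (· ≤ ·) := by
          rw [hdecomp]; exact hs
        exact (List.pairwise_append.1 hs').2.2 x hx' p (by simp)
      · exact hs.take.sublist List.filter_sublist
    rw [hsd]
  · rw [if_neg hflag]
    have hfp : f p = false := Bool.eq_false_iff.2 hflag
    conv_rhs => rw [← hdecomp]
    rw [List.filter_append, List.filter_append, List.filter_cons, if_neg (by simp [hfp])]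

theorem overlap_graph_eq (patterns : List String) :
    overlap_graph patterns = overlap_graph_alt patterns := by
  rw [pvA_normal, pvB_normal]
  set s := PySem.List.sorted patterns (fun x => x) with hs
  rw [← pvFlat_range s (pvEB s)]
  apply pvFlatMap_congr
  intro i hi
  exact pvPer_index s (PySem.List.sorted_pairwise patterns (fun x => x)) i
    (List.mem_range.1 hi)

-- ===== VERDICT (by name: the statement is the Claim_ definition above) =====
theorem overlap_graph_spec : Claim_equal_overlap_graph := by
  intro patterns _
  unfold Spec_overlap_graph
  exact overlap_graph_eq patterns
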